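-- pv_equiv track=rewrite | github.com/Drobyshevladimir/Drobyshevladimir | контест 3/клим спасиба.py | five_med
-- ===== SOURCE A (Python) =====
-- def five_med(B):
--     for j in B:
--             count_less = 0
--             count_more = 0
--             count_eq = 0
--             for c in B:
--                 if c < j:
--                     count_less += 1
--                 elif c > j:
--                     count_more += 1
--                 else:
--                     count_eq += 1
--             if (count_less == count_more):
--                 b = j
--                 break
--             elif (count_less == 0 and count_eq == 3) or (count_more == 0 and count_eq == 3) \
--             or (count_more == 1 and count_eq == 2) or (count_less == 1 and count_eq == 2) \
--             or (count_eq == 4):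
--                 b = j
--                 break
--     return b
-- ===== SOURCE B (Python) =====
-- def five_med(B):
--     # Sort once; per candidate j, get the three counts by two hand-written
--     # binary searches on the sorted copy instead of rescanning B.
--     s = sorted(B)
--     n = len(s)
--
--     def bisect_left(a, x):
--         lo, hi = 0, len(a)
--         while lo < hi:
--             mid = (lo + hi) // 2
--             if a[mid] < x:
--                 lo = mid + 1
--             else:
--                 hi = mid
--         return lo
--
--     def bisect_right(a, x):
--         lo, hi = 0, len(a)
--         while lo < hi:
--             mid = (lo + hi) // 2
--             if x < a[mid]:
--                 hi = mid
--             else: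
--                 lo = mid + 1
--         return lo
--
--     for j in B:
--         count_less = bisect_left(s, j)
--         count_more = n - bisect_right(s, j)
--         count_eq = n - count_less - count_more
--         if (count_less == count_more) \
--            or (count_less == 0 and count_eq == 3) or (count_more == 0 and count_eq == 3) \
--            or (count_more == 1 and count_eq == 2) or (count_less == 1 and count_eq == 2) \
--            or (count_eq == 4):
--             b = j
--             break
--     return b
-- ===== Notes on version B (the rewrite author's own statement) =====
-- stated objective: faster
-- what changed: B sorts a copy of B once and gets each candidate's less/more/equal counts by two hand-written binary searches on the sorted copy, replacing A's inner linear rescan of B for every candidate.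
import Mathlib
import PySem

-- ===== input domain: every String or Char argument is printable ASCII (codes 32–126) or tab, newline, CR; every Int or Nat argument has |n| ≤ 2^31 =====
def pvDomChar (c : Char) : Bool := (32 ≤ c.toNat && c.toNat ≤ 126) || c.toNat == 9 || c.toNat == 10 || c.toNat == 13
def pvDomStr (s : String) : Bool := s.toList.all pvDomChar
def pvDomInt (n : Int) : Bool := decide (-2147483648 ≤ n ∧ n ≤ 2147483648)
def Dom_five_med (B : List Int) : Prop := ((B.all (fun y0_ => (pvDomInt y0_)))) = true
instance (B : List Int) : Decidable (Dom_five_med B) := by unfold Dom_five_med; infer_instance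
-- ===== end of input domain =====

-- B replaces A's inner linear count scan by one sort plus two binary searches per candidate (faster).
-- Both programs raise UnboundLocalError when no candidate matches; those inputs are excluded by Pre_five_med.

-- ===== PORT A =====
-- the inner for-loop of A: one fold over B accumulating (count_less, count_more, count_eq)
def fiveCounts (B : List Int) (j : Int) : Int × Int × Int :=
  B.foldl (fun acc c =>
    if c < j then (acc.1 + 1, acc.2.1, acc.2.2)
    else if j < c then (acc.1, acc.2.1 + 1, acc.2.2)
    else (acc.1, acc.2.1, acc.2.2 + 1)) (0, 0, 0)

-- the outer for-loop of A; `none` = loop finished without `break` (Python raises UnboundLocalError)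
def fiveLoop (B : List Int) : List Int → Option Int
  | [] => none
  | j :: rest =>
    let cl := (fiveCounts B j).1
    let cm := (fiveCounts B j).2.1
    let ce := (fiveCounts B j).2.2
    if cl = cm then some j
    else if (cl = 0 ∧ ce = 3) ∨ (cm = 0 ∧ ce = 3) ∨ (cm = 1 ∧ ce = 2) ∨ (cl = 1 ∧ ce = 2) ∨ ce = 4 then some j
    else fiveLoop B rest

def five_med (B : List Int) : Int := (fiveLoop B B).getD 0

-- ===== PORT B =====
-- Source B's hand-written bisect_left while-loop (a[mid] is always in range: lo ≤ mid < hi ≤ len a, so getD's default is never used)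
def blLoop (a : List Int) (x : Int) (lo hi : Nat) : Nat :=
  if _h : lo < hi then
    let mid := (lo + hi) / 2
    if a.getD mid 0 < x then blLoop a x (mid + 1) hi else blLoop a x lo mid
  else lo
termination_by hi - lo
decreasing_by all_goals omega

-- Source B's hand-written bisect_right while-loop
def brLoop (a : List Int) (x : Int) (lo hi : Nat) : Nat :=
  if _h : lo < hi then
    let mid := (lo + hi) / 2
    if x < a.getD mid 0 then brLoop a x lo mid else brLoop a x (mid + 1) hi
  else lo
termination_by hi - lo
decreasing_by all_goals omega

def bisectL (a : List Int) (x : Int) : Nat := blLoop a x 0 a.length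
def bisectR (a : List Int) (x : Int) : Nat := brLoop a x 0 a.length

-- Source B's for-loop over B, counts from binary searches on the sorted copy s
def altLoop (s : List Int) (n : Int) : List Int → Option Int
  | [] => none
  | j :: rest =>
    let cl : Int := (bisectL s j : Int)
    let cm : Int := n - (bisectR s j : Int)
    let ce : Int := n - cl - cm
    if cl = cm ∨ (cl = 0 ∧ ce = 3) ∨ (cm = 0 ∧ ce = 3) ∨ (cm = 1 ∧ ce = 2) ∨ (cl = 1 ∧ ce = 2) ∨ ce = 4
    then some j
    else altLoop s n rest

def five_med_alt (B : List Int) : Int :=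
  let s := PySem.List.sorted B (fun x => x) false
  let n : Int := (s.length : Int)
  (altLoop s n B).getD 0

-- ===== PRECONDITION & SPEC =====
-- Pre_ excludes exactly the inputs on which A's loop finds no matching candidate, where A (and B)
-- raise UnboundLocalError: some j in B must satisfy the break condition on its comparison counts.
def Pre_five_med (B : List Int) : Prop :=
  ∃ j ∈ B,
    (B.countP (fun c => decide (c < j)) = B.countP (fun c => decide (j < c))) ∨
    (B.countP (fun c => decide (c < j)) = 0 ∧ B.countP (fun c => decide (c = j)) = 3) ∨
    (B.countP (fun c => decide (j < c)) = 0 ∧ B.countP (fun c => decide (c = j)) = 3) ∨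
    (B.countP (fun c => decide (j < c)) = 1 ∧ B.countP (fun c => decide (c = j)) = 2) ∨
    (B.countP (fun c => decide (c < j)) = 1 ∧ B.countP (fun c => decide (c = j)) = 2) ∨
    (B.countP (fun c => decide (c = j)) = 4)
instance (B : List Int) : Decidable (Pre_five_med B) := by unfold Pre_five_med; infer_instance

def pvWitness_five_med : List Int := [1, 2, 3]

def Spec_five_med (B : List Int) (out : Int) : Prop := out = five_med_alt B
instance (B : List Int) (out : Int) : Decidable (Spec_five_med B out) := by unfold Spec_five_med; infer_instance

-- ===== CLAIM (what is proved, stated in full; the proofs are below) =====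
def Claim_equal_five_med : Prop := ∀ (B : List Int), Dom_five_med B → Pre_five_med B → Spec_five_med B (five_med B)

-- ===== LEMMAS AND PROOFS =====

-- A's inner fold computes the three comparison counts
lemma fiveCounts_eq (B : List Int) (j : Int) :
    fiveCounts B j = ((B.countP (fun c => decide (c < j)) : Int),
                      (B.countP (fun c => decide (j < c)) : Int),
                      (B.countP (fun c => decide (c = j)) : Int)) := by
  have h : ∀ (l : List Int) (a b c : Int),
      l.foldl (fun acc c =>
        if c < j then (acc.1 + 1, acc.2.1, acc.2.2)
        else if j < c then (acc.1, acc.2.1 + 1, acc.2.2)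
        else (acc.1, acc.2.1, acc.2.2 + 1)) (a, b, c) =
      (a + (l.countP (fun c => decide (c < j)) : Int),
       b + (l.countP (fun c => decide (j < c)) : Int),
       c + (l.countP (fun c => decide (c = j)) : Int)) := by
    intro l
    induction l with
    | nil => simp
    | cons x t ih =>
      intro a b c
      rcases lt_trichotomy x j with hx | hx | hx
      · simp [List.countP_cons, hx, not_lt_of_gt hx, hx.ne, ih, Prod.ext_iff]
        push_cast; omega
      · subst hx
        simp [List.countP_cons, lt_irrefl, ih, Prod.ext_iff]
        push_cast; omega
      · simp [List.countP_cons, hx, not_lt_of_gt hx, hx.ne', ih, Prod.ext_iff]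
        push_cast; omega
  unfold fiveCounts
  rw [h]; simp

-- binary-search invariant for bisect_left on a position-monotone list
lemma blLoop_char (a : List Int) (x : Int)
    (hs : ∀ p q (hp : p < a.length) (hq : q < a.length), p ≤ q → a[p] ≤ a[q]) :
    ∀ fuel lo hi, hi - lo = fuel → lo ≤ hi → hi ≤ a.length →
    (∀ k (hk : k < a.length), k < lo → a[k] < x) →
    (∀ k (hk : k < a.length), hi ≤ k → ¬ a[k] < x) →
    (blLoop a x lo hi ≤ a.length ∧ ∀ k (hk : k < a.length), (a[k] < x ↔ k < blLoop a x lo hi)) := by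
  intro fuel
  induction fuel using Nat.strong_induction_on with
  | _ fuel ih =>
    intro lo hi hf hlh hhl hpre hpost
    by_cases h : lo < hi
    · rw [blLoop]
      simp only [dif_pos h]
      have hmlt : (lo + hi) / 2 < hi := by omega
      have hmlo : lo ≤ (lo + hi) / 2 := by omega
      have hmlen : (lo + hi) / 2 < a.length := by omega
      rw [List.getD_eq_getElem a 0 hmlen]
      by_cases hc : a[(lo + hi) / 2] < x
      · rw [if_pos hc]
        exact ih (hi - ((lo + hi) / 2 + 1)) (by omega) ((lo + hi) / 2 + 1) hi rfl (by omega) hhl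
          (fun k hk hklt => lt_of_le_of_lt (hs k ((lo + hi) / 2) hk hmlen (by omega)) hc)
          hpost
      · rw [if_neg hc]
        refine ih ((lo + hi) / 2 - lo) (by omega) lo ((lo + hi) / 2) rfl (by omega) (by omega)
          hpre (fun k hk hkge hklt => hc ?_)
        exact lt_of_le_of_lt (hs ((lo + hi) / 2) k hmlen hk hkge) hklt
    · rw [blLoop]
      simp only [dif_neg h]
      have hle : lo = hi := by omega
      refine ⟨by omega, fun k hk => ⟨fun hkx => ?_, fun hklt => hpre k hk hklt⟩⟩
      by_contra hnk
      exact hpost k hk (by omega) hkx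

-- binary-search invariant for bisect_right
lemma brLoop_char (a : List Int) (x : Int)
    (hs : ∀ p q (hp : p < a.length) (hq : q < a.length), p ≤ q → a[p] ≤ a[q]) :
    ∀ fuel lo hi, hi - lo = fuel → lo ≤ hi → hi ≤ a.length →
    (∀ k (hk : k < a.length), k < lo → a[k] ≤ x) →
    (∀ k (hk : k < a.length), hi ≤ k → ¬ a[k] ≤ x) →
    (brLoop a x lo hi ≤ a.length ∧ ∀ k (hk : k < a.length), (a[k] ≤ x ↔ k < brLoop a x lo hi)) := by
  intro fuel
  induction fuel using Nat.strong_induction_on with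
  | _ fuel ih =>
    intro lo hi hf hlh hhl hpre hpost
    by_cases h : lo < hi
    · rw [brLoop]
      simp only [dif_pos h]
      have hmlt : (lo + hi) / 2 < hi := by omega
      have hmlo : lo ≤ (lo + hi) / 2 := by omega
      have hmlen : (lo + hi) / 2 < a.length := by omega
      rw [List.getD_eq_getElem a 0 hmlen]
      by_cases hc : x < a[(lo + hi) / 2]
      · rw [if_pos hc]
        refine ih ((lo + hi) / 2 - lo) (by omega) lo ((lo + hi) / 2) rfl (by omega) (by omega)
          hpre (fun k hk hkge hkle => absurd hkle ?_)
        exact not_le_of_gt (lt_of_lt_of_le hc (hs ((lo + hi) / 2) k hmlen hk hkge))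
      · rw [if_neg hc]
        exact ih (hi - ((lo + hi) / 2 + 1)) (by omega) ((lo + hi) / 2 + 1) hi rfl (by omega) hhl
          (fun k hk hklt => le_trans (hs k ((lo + hi) / 2) hk hmlen (by omega)) (not_lt.1 hc))
          hpost
    · rw [brLoop]
      simp only [dif_neg h]
      have hle : lo = hi := by omega
      refine ⟨by omega, fun k hk => ⟨fun hkx => ?_, fun hklt => hpre k hk hklt⟩⟩
      by_contra hnk
      exact hpost k hk (by omega) hkx

-- a prefix-characterised predicate is counted by its cut point
lemma countP_of_char (a : List Int) (p : Int → Bool) (r : Nat) (hr : r ≤ a.length)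
    (h : ∀ k (hk : k < a.length), (p a[k] = true ↔ k < r)) : a.countP p = r := by
  have hsplit : a.countP p = (a.take r).countP p + (a.drop r).countP p := by
    conv_lhs => rw [← List.take_append_drop r a]
    exact List.countP_append ..
  have h1 : (a.take r).countP p = r := by
    have hlen : (a.take r).length = r := by simp [List.length_take, hr]
    have hall : ∀ y ∈ a.take r, p y = true := by
      intro y hy
      obtain ⟨k, hk, rfl⟩ := List.mem_iff_getElem.1 hy
      rw [List.getElem_take]
      exact (h k (by simp at hk; omega)).2 (by simp at hk; omega)
    rw [List.countP_eq_length.2 hall, hlen]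
  have h2 : (a.drop r).countP p = 0 := by
    refine List.countP_eq_zero.2 (fun y hy => ?_)
    obtain ⟨k, hk, rfl⟩ := List.mem_iff_getElem.1 hy
    rw [List.getElem_drop]
    intro hp
    have := (h (r + k) (by simp at hk; omega)).1 hp
    omega
  omega

lemma bisectL_count (a : List Int) (x : Int)
    (hs : ∀ p q (hp : p < a.length) (hq : q < a.length), p ≤ q → a[p] ≤ a[q]) :
    bisectL a x = a.countP (fun c => decide (c < x)) := by
  obtain ⟨hle, hchar⟩ := blLoop_char a x hs (a.length - 0) 0 a.length rfl (by omega) le_rfl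
    (by omega) (by omega)
  exact (countP_of_char a _ _ hle (fun k hk => by simp [hchar k hk])).symm

lemma bisectR_count (a : List Int) (x : Int)
    (hs : ∀ p q (hp : p < a.length) (hq : q < a.length), p ≤ q → a[p] ≤ a[q]) :
    bisectR a x = a.countP (fun c => decide (c ≤ x)) := by
  obtain ⟨hle, hchar⟩ := brLoop_char a x hs (a.length - 0) 0 a.length rfl (by omega) le_rfl
    (by omega) (by omega)
  exact (countP_of_char a _ _ hle (fun k hk => by simp [hchar k hk])).symm

lemma tricount (l : List Int) (j : Int) :
    l.countP (fun c => decide (c < j)) + l.countP (fun c => decide (c = j))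
      + l.countP (fun c => decide (j < c)) = l.length := by
  induction l with
  | nil => simp
  | cons x t ih =>
    rcases lt_trichotomy x j with hx | hx | hx
    · simp [List.countP_cons, hx, not_lt_of_gt hx, ne_of_lt hx]; omega
    · subst hx; simp [List.countP_cons, lt_irrefl]; omega
    · simp [List.countP_cons, hx, not_lt_of_gt hx, ne_of_gt hx]; omega

lemma lecount (l : List Int) (j : Int) :
    l.countP (fun c => decide (c ≤ j)) =
      l.countP (fun c => decide (c < j)) + l.countP (fun c => decide (c = j)) := by
  induction l with
  | nil => simp
  | cons x t ih =>
    rcases lt_trichotomy x j with hx | hx | hx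
    · simp [List.countP_cons, hx, le_of_lt hx, ne_of_lt hx]; omega
    · subst hx; simp [List.countP_cons, lt_irrefl, le_refl]; omega
    · simp [List.countP_cons, hx, not_lt_of_gt hx, not_le_of_gt hx, ne_of_gt hx]; omega

-- the two loops agree element by element
lemma loop_eq (B : List Int) :
    ∀ l, fiveLoop B l = altLoop (PySem.List.sorted B (fun x => x) false)
      ((PySem.List.sorted B (fun x => x) false).length : Int) l := by
  intro l
  induction l with
  | nil => rfl
  | cons j rest ih =>
    have hperm := PySem.List.sorted_perm B (fun x => x) false
    have hs : ∀ p q (hp : p < (PySem.List.sorted B (fun x => x) false).length)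
        (hq : q < (PySem.List.sorted B (fun x => x) false).length), p ≤ q →
        (PySem.List.sorted B (fun x => x) false)[p] ≤ (PySem.List.sorted B (fun x => x) false)[q] :=
      fun p q hp hq hpq => PySem.List.sorted_id_getElem_mono B hpq hq
    have hL := bisectL_count (PySem.List.sorted B (fun x => x) false) j hs
    have hR := bisectR_count (PySem.List.sorted B (fun x => x) false) j hs
    rw [hperm.countP_eq] at hL
    rw [lecount, hperm.countP_eq, hperm.countP_eq] at hR
    have hlen : (PySem.List.sorted B (fun x => x) false).length = B.length := hperm.length_eq
    have htri := tricount B j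
    rw [fiveLoop, altLoop, fiveCounts_eq, hL, hR, hlen]
    simp only []
    set L := B.countP (fun c => decide (c < j)) with hLdef
    set M := B.countP (fun c => decide (j < c)) with hMdef
    set E := B.countP (fun c => decide (c = j)) with hEdef
    have hM : (B.length : Int) - ((L + E : Nat) : Int) = (M : Int) := by push_cast; omega
    have hE : (B.length : Int) - (L : Int) - ((B.length : Int) - ((L + E : Nat) : Int)) = (E : Int) := by
      push_cast; omega
    rw [hM, hE] at *
    by_cases h1 : (L : Int) = (M : Int)
    · rw [if_pos h1, if_pos (Or.inl h1)]
    · rw [if_neg h1]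
      by_cases h2 : ((L : Int) = 0 ∧ (E : Int) = 3) ∨ ((M : Int) = 0 ∧ (E : Int) = 3) ∨
          ((M : Int) = 1 ∧ (E : Int) = 2) ∨ ((L : Int) = 1 ∧ (E : Int) = 2) ∨ (E : Int) = 4
      · rw [if_pos h2, if_pos (Or.inr h2)]
      · rw [if_neg h2, if_neg (by tauto), ih, hlen]

theorem five_med_eq (B : List Int) : five_med B = five_med_alt B := by
  unfold five_med five_med_alt
  rw [loop_eq]

-- ===== VERDICT (by name: the statement is the Claim_ definition above) =====
theorem five_med_spec : Claim_equal_five_med := by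
  intro B _ _
  unfold Spec_five_med
  exact five_med_eq B
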